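-- pv_equiv track=rewrite | github.com/Don-Antonio18/Personal-Projects | Labs/COMP1126/lab4Q3.py | encoded_string
-- ===== SOURCE A (Python) =====
-- def encoded_string (lst):
--     if lst == "":
--         return ""
--     else:
--         char = ord(lst[0]) #gets ascii value of chaarcter
--         if char % 2 == 0:  # checks if ascii of char is even
--             char += 4       # adds 4 to value
--         else:               # otherwise it is odd so no elif needed
--             char += 2       # adds 2 to value
--         # returns new string
--         return chr(char) + encoded_string(lst[1:])
-- ===== SOURCE B (Python) =====
-- def encoded_string(lst):
--     out = []
--     for c in lst:
--         code = ord(c)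
--         if code % 2 == 0:
--             code += 4
--         else:
--             code += 2
--         out.append(chr(code))
--     return ''.join(out)
-- ===== Notes on version B (the rewrite author's own statement) =====
-- stated objective: simpler
-- what changed: Replaced head/tail recursion with repeated string slicing by a single iterative loop over characters accumulating into a list joined once.
import Mathlib
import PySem

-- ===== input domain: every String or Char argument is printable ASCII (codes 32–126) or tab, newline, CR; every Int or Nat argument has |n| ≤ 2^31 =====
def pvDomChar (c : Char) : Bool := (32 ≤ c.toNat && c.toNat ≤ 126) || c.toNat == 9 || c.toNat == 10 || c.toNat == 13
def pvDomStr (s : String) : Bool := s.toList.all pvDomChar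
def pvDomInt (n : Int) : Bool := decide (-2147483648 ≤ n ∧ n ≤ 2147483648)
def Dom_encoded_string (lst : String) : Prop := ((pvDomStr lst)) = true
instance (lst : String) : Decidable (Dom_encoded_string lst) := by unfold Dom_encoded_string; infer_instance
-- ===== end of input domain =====

-- B replaces A's head/tail recursion with repeated slicing by a single iterative
-- accumulator loop joined once at the end (simpler, linear instead of quadratic in Python).


-- ===== PORT A =====
-- A: if lst == "" return "" else chr(shifted ord(lst[0])) + encoded_string(lst[1:])
def encAAux : List Char → List Char
  | [] => []
  | c :: rest =>
    let char := c.toNat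
    let char := if char % 2 == 0 then char + 4 else char + 2
    Char.ofNat char :: encAAux rest

def encoded_string (lst : String) : String := String.mk (encAAux lst.toList)

-- ===== PORT B =====
-- B: out = []; for c in lst: append shifted char; return ''.join(out)
def encBStep (out : List Char) (c : Char) : List Char :=
  let code := c.toNat
  let code := if code % 2 == 0 then code + 4 else code + 2
  out ++ [Char.ofNat code]

def encoded_string_alt (lst : String) : String :=
  String.mk (lst.toList.foldl encBStep [])

-- ===== PRECONDITION & SPEC =====
def Spec_encoded_string (lst : String) (out : String) : Prop := out = encoded_string_alt lst
instance (lst : String) (out : String) : Decidable (Spec_encoded_string lst out) := by unfold Spec_encoded_string; infer_instance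

-- ===== CLAIM (what is proved, stated in full; the proofs are below) =====
def Claim_equal_encoded_string : Prop := ∀ (lst : String), Dom_encoded_string lst → Spec_encoded_string lst (encoded_string lst)

-- ===== LEMMAS AND PROOFS =====
theorem encB_foldl_eq (cs : List Char) (acc : List Char) :
    cs.foldl encBStep acc = acc ++ encAAux cs := by
  induction cs generalizing acc with
  | nil => simp [encAAux]
  | cons c rest ih =>
    simp [List.foldl, encBStep, encAAux, ih, List.append_assoc]

-- ===== VERDICT (by name: the statement is the Claim_ definition above) =====
theorem encoded_string_spec : Claim_equal_encoded_string := by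
  intro lst _
  unfold Spec_encoded_string encoded_string encoded_string_alt
  rw [encB_foldl_eq]
  simp
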